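-- pv_equiv track=rewrite | github.com/opentelekomcloud-docs/doc-exports | process.py | get_target_path
-- ===== SOURCE A (Python) =====
-- def get_target_path(code, metadata, path=''):
--     if code in metadata:
--         current = metadata[code]
--         if not current.get('p_code'):
--             return current['new_name']
--         else:
--             return (
--                 "{0}/{1}".format(
--                     get_target_path(current['p_code'], metadata),
--                     current['new_name'])
--             )
--     else:
--         return ''
-- ===== SOURCE B (Python) =====
-- def get_target_path(code, metadata, path=''):
--     if code not in metadata:
--         return ''
--     segments = []
--     cur = metadata[code]
--     while True:
--         segments.append(cur['new_name'])
--         p = cur.get('p_code')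
--         if not p:
--             break
--         if p not in metadata:
--             segments.append('')
--             break
--         cur = metadata[p]
--     return '/'.join(reversed(segments))
-- ===== Notes on version B (the rewrite author's own statement) =====
-- stated objective: alternative
-- what changed: Replaces the recursive parent-chain descent with an iterative loop that collects the name segments in a list and joins them reversed in one pass, with no repeated string formatting.
import Mathlib
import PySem

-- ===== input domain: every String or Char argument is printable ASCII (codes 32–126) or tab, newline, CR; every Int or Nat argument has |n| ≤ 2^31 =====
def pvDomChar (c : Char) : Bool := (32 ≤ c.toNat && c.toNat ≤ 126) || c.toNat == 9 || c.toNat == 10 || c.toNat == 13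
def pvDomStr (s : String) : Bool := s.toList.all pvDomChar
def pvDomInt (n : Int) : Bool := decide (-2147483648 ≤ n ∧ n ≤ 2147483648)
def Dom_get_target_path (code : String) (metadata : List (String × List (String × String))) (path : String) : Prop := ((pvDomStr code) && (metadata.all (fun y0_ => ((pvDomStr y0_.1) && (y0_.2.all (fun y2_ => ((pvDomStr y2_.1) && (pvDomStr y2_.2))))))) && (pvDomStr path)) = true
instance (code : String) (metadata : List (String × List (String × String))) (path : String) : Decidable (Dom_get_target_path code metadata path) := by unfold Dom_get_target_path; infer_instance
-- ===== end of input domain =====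

-- B replaces A's recursive parent-chain descent by an iterative loop that collects the
-- name segments in a list and joins them reversed once (objective: alternative).
-- The `path` parameter is unused by both Pythons and both ports, exactly as in A.

-- ===== PORT A =====
-- A is recursive with no structural bound (a cyclic p_code chain makes Python raise
-- RecursionError), so the port carries a fuel argument; Pre_ guarantees the fuel
-- metadata.length + 1 is never exhausted, so the fuel branch is unreachable on Pre_.
-- current['new_name'] is ported as getD "" : on Pre_ the key is present (KeyError inputs
-- are excluded by Pre_).
def pvAgo (metadata : List (String × List (String × String))) : Nat → String → String
  | 0, _ => ""
  | n + 1, code =>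
    match metadata.lookup code with
    | none => ""                                     -- else: return ''
    | some current =>
      match current.lookup "p_code" with             -- current.get('p_code')
      | none => ((current.lookup "new_name").getD "")
      | some p =>
        if p = "" then ((current.lookup "new_name").getD "")   -- falsy p_code
        else PySem.Str.join "/" [pvAgo metadata n p, ((current.lookup "new_name").getD "")]  -- "{0}/{1}".format

def get_target_path (code : String) (metadata : List (String × List (String × String))) (path : String) : String :=
  pvAgo metadata (metadata.length + 1) code

-- ===== PORT B =====
-- the while-loop of Source B, fueled like A's recursion (unreachable-on-Pre_ fuel-0 branch
-- returns the join of what was accumulated).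
def pvBloop (metadata : List (String × List (String × String))) : Nat → List (String × String) → List String → String
  | 0, _, segments => PySem.Str.join "/" segments.reverse
  | n + 1, cur, segments =>
    let segments := segments ++ [((cur.lookup "new_name").getD "")]   -- segments.append(cur['new_name'])
    match cur.lookup "p_code" with
    | none => PySem.Str.join "/" segments.reverse                     -- not p: break
    | some p =>
      if p = "" then PySem.Str.join "/" segments.reverse              -- not p: break
      else
        match metadata.lookup p with
        | none => PySem.Str.join "/" (segments ++ [""]).reverse       -- p not in metadata: append '', break
        | some c => pvBloop metadata n c segments                     -- cur = metadata[p]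

def get_target_path_alt (code : String) (metadata : List (String × List (String × String))) (path : String) : String :=
  match metadata.lookup code with
  | none => ""
  | some cur => pvBloop metadata (metadata.length + 1) cur []

-- ===== PRECONDITION & SPEC =====
-- Pre_ excludes exactly the inputs on which Python A raises: a cyclic p_code chain
-- (RecursionError) or a chain entry without a 'new_name' key (KeyError); A returns
-- normally on every other input, and a terminating chain makes at most
-- metadata.length successful lookups, so this fuel bound loses nothing.
def pvOk (metadata : List (String × List (String × String))) : Nat → String → Bool
  | 0, _ => false
  | n + 1, code =>
    match metadata.lookup code with
    | none => true
    | some current =>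
      (current.lookup "new_name").isSome &&
        (match current.lookup "p_code" with
         | none => true
         | some p => p == "" || pvOk metadata n p)

def Pre_get_target_path (code : String) (metadata : List (String × List (String × String))) (path : String) : Prop :=
  pvOk metadata (metadata.length + 1) code = true
instance (code : String) (metadata : List (String × List (String × String))) (path : String) : Decidable (Pre_get_target_path code metadata path) := by unfold Pre_get_target_path; infer_instance

def pvWitness_get_target_path : String × (List (String × List (String × String))) × String :=
  ("a", [("a", [("new_name", "x"), ("p_code", "b")]), ("b", [("new_name", "root")])], "")

def Spec_get_target_path (code : String) (metadata : List (String × List (String × String))) (path : String) (out : String) : Prop := out = get_target_path_alt code metadata path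
instance (code : String) (metadata : List (String × List (String × String))) (path : String) (out : String) : Decidable (Spec_get_target_path code metadata path out) := by unfold Spec_get_target_path; infer_instance

-- ===== CLAIM (what is proved, stated in full; the proofs are below) =====
def Claim_equal_get_target_path : Prop := ∀ (code : String) (metadata : List (String × List (String × String))) (path : String), Dom_get_target_path code metadata path → Pre_get_target_path code metadata path → Spec_get_target_path code metadata path (get_target_path code metadata path)

-- ===== LEMMAS AND PROOFS =====

-- the root-first list of path segments of A's answer along the chain from `code`
def pvSegs (metadata : List (String × List (String × String))) : Nat → String → List String
  | 0, _ => []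
  | n + 1, code =>
    match metadata.lookup code with
    | none => [""]
    | some current =>
      match current.lookup "p_code" with
      | none => [((current.lookup "new_name").getD "")]
      | some p =>
        if p = "" then [((current.lookup "new_name").getD "")]
        else pvSegs metadata n p ++ [((current.lookup "new_name").getD "")]

theorem pvSegs_ne_nil (metadata : List (String × List (String × String))) (n : Nat) (code : String)
    (h : pvOk metadata n code = true) : pvSegs metadata n code ≠ [] := by
  cases n with
  | zero => simp [pvOk] at h
  | succ n =>
    cases hl : metadata.lookup code with
    | none => simp [pvSegs, hl]
    | some current =>
      cases hp : current.lookup "p_code" with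
      | none => simp [pvSegs, hl, hp]
      | some p => by_cases hpe : p = "" <;> simp [pvSegs, hl, hp, hpe]

theorem pv_join_inj (s t : String) (h : s.toList = t.toList) : s = t := by
  have h2 := congrArg String.ofList h
  simpa using h2

theorem pv_join_singleton (s : String) : PySem.Str.join "/" [s] = s := by
  apply pv_join_inj
  simp [PySem.Str.toList_join, PySem.Chars.join_singleton]

theorem pv_chars_join_app (l : List (List Char)) (a : List Char) (hl : l ≠ []) :
    PySem.Chars.join "/".toList [PySem.Chars.join "/".toList l, a] =
      PySem.Chars.join "/".toList (l ++ [a]) := by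
  induction l with
  | nil => simp at hl
  | cons x xs ih =>
    cases xs with
    | nil => simp [PySem.Chars.join_singleton, PySem.Chars.join_cons_cons]
    | cons y ys =>
      have h2 := ih (by simp)
      rw [PySem.Chars.join_cons_cons, PySem.Chars.join_singleton] at h2 ⊢
      have h3 : PySem.Chars.join "/".toList ((x :: y :: ys) ++ [a]) =
          x ++ "/".toList ++ PySem.Chars.join "/".toList ((y :: ys) ++ [a]) := by
        rw [show ((x :: y :: ys : List (List Char)) ++ [a]) = x :: y :: (ys ++ [a]) from rfl,
          PySem.Chars.join_cons_cons]
        rfl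
      rw [h3, ← h2, PySem.Chars.join_cons_cons]
      simp [List.append_assoc]

theorem pv_join_app (l : List String) (a : String) (hl : l ≠ []) :
    PySem.Str.join "/" [PySem.Str.join "/" l, a] = PySem.Str.join "/" (l ++ [a]) := by
  apply pv_join_inj
  simp only [PySem.Str.toList_join, List.map_cons, List.map_nil, List.map_append,
    List.map_singleton]
  exact pv_chars_join_app (l.map String.toList) a.toList (by simpa using hl)

-- A's fueled recursion computes the join of the root-first segment list
theorem pvAgo_eq_segs (metadata : List (String × List (String × String))) (n : Nat) (code : String)
    (h : pvOk metadata n code = true) :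
    pvAgo metadata n code = PySem.Str.join "/" (pvSegs metadata n code) := by
  induction n generalizing code with
  | zero => simp [pvOk] at h
  | succ n ih =>
    cases hl : metadata.lookup code with
    | none => simp [pvAgo, pvSegs, hl, pv_join_singleton]
    | some current =>
      simp only [pvOk, hl, Bool.and_eq_true] at h
      cases hp : current.lookup "p_code" with
      | none => simp [pvAgo, pvSegs, hl, hp, pv_join_singleton]
      | some p =>
        by_cases hpe : p = ""
        · simp [pvAgo, pvSegs, hl, hp, hpe, pv_join_singleton]
        · have hok : pvOk metadata n p = true := by
            rw [hp] at h
            rcases h with ⟨-, h2⟩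
            simp only [Bool.or_eq_true, beq_iff_eq] at h2
            tauto
          have hne := pvSegs_ne_nil metadata n p hok
          simp only [pvAgo, pvSegs, hl, if_neg hpe, hp]
          rw [ih p hok, pv_join_app _ _ hne]

-- B's loop extends the accumulated (child-first) segments with A's segment list
theorem pvBloop_eq_segs (metadata : List (String × List (String × String))) (n : Nat)
    (code : String) (cur : List (String × String)) (segments : List String)
    (hl : metadata.lookup code = some cur) (h : pvOk metadata n code = true) :
    pvBloop metadata n cur segments =
      PySem.Str.join "/" (pvSegs metadata n code ++ segments.reverse) := by
  induction n generalizing code cur segments with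
  | zero => simp [pvOk] at h
  | succ n ih =>
    simp only [pvBloop, pvSegs, hl]
    simp only [pvOk, hl, Bool.and_eq_true] at h
    cases hp : cur.lookup "p_code" with
    | none => simp [hp]
    | some p =>
      rw [hp] at h
      by_cases hpe : p = ""
      · simp [hp, hpe]
      · have hok : pvOk metadata n p = true := by
          rcases h with ⟨-, h2⟩
          simp only [Bool.or_eq_true, beq_iff_eq] at h2
          tauto
        cases hlp : metadata.lookup p with
        | none =>
          have hseg : pvSegs metadata n p = [""] := by
            cases n with
            | zero => simp [pvOk] at hok
            | succ m => simp [pvSegs, hlp]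
          simp [hp, hpe, hlp, hseg]
        | some c =>
          simp only [hp, if_neg hpe, hlp]
          rw [ih p c _ hlp hok]
          simp [List.append_assoc]

-- ===== VERDICT (by name: the statement is the Claim_ definition above) =====
theorem get_target_path_spec : Claim_equal_get_target_path := by
  intro code metadata path _hdom hpre
  unfold Spec_get_target_path get_target_path get_target_path_alt
  unfold Pre_get_target_path at hpre
  cases hl : metadata.lookup code with
  | none => simp [pvAgo, hl]
  | some cur =>
    show pvAgo metadata (metadata.length + 1) code = pvBloop metadata (metadata.length + 1) cur []
    rw [pvAgo_eq_segs metadata _ code hpre,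
      pvBloop_eq_segs metadata _ code cur [] hl hpre]
    simp
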